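-- pv_equiv track=rewrite | github.com/dukelw/algorithm-for-mining-high-utility-itemsets-from-unstable-negative-profit-databases | emhun.py | categorize_items
-- ===== SOURCE A (Python) =====
-- def categorize_items(dataset):
--     """
--     Classify items into positive-only, hybrid, and negative-only based on their utilities in the dataset.
--     """
--     item_utilities = {}
--
--     for transaction in dataset:
--         for item, profit in zip(transaction["items"], transaction["profit"]):
--             if item not in item_utilities:
--                 item_utilities[item] = []
--             item_utilities[item].append(profit)
--
--     positive_items = []
--     hybrid_items = []
--     negative_items = []
--
--     for item, utilities in item_utilities.items():
--         if all(u > 0 for u in utilities):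
--             positive_items.append(item)
--         elif all(u < 0 for u in utilities):
--             negative_items.append(item)
--         else:
--             hybrid_items.append(item)
--
--     return positive_items, hybrid_items, negative_items
-- ===== SOURCE B (Python) =====
-- def categorize_items(dataset):
--     """
--     Classify items into positive-only, hybrid, and negative-only based on their utilities in the dataset.
--     Flat pair list + sign-flag sets instead of a dict of profit lists re-scanned with all().
--     """
--     pairs = [(item, profit)
--              for transaction in dataset
--              for item, profit in zip(transaction["items"], transaction["profit"])]
--     order = list(dict.fromkeys(item for item, _ in pairs))
--     has_nonpos = {item for item, profit in pairs if profit <= 0}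
--     has_nonneg = {item for item, profit in pairs if profit >= 0}
--     positive_items = [i for i in order if i not in has_nonpos]
--     hybrid_items = [i for i in order if i in has_nonpos and i in has_nonneg]
--     negative_items = [i for i in order if i not in has_nonneg]
--     return positive_items, hybrid_items, negative_items
-- ===== Notes on version B (the rewrite author's own statement) =====
-- stated objective: alternative
-- what changed: B flattens the dataset into one (item, profit) pair list, derives the first-seen item order and two sign-flag sets (has a profit <= 0 / has a profit >= 0) by comprehensions, and classifies with three filters over the order list, instead of A's dict of per-item profit lists classified by a branching loop that re-scans each list with all().
import Mathlib
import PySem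

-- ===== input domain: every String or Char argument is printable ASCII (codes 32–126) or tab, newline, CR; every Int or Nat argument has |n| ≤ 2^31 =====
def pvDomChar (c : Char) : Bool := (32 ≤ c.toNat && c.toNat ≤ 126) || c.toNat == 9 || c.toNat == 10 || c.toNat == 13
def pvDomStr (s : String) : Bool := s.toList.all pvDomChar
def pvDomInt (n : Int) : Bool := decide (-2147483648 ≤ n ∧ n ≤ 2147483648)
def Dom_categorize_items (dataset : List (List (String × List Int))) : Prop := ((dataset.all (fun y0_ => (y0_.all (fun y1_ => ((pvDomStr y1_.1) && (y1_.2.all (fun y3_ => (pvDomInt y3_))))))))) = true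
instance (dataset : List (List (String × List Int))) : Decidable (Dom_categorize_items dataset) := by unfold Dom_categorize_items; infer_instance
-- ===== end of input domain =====

-- B flattens the dataset into one pair list, builds the first-seen order and two sign-flag
-- sets by comprehensions, and classifies with three filters; the return value is identical.

-- ===== PORT A =====

-- transaction[k]: first-match lookup in the association list; total here via default [],
-- faithful under Pre_ (the key is present; Python raises KeyError otherwise)
def tGet (t : List (String × List Int)) (k : String) : List Int :=
  (PySem.Dict.mk t).getD k []

-- inner loop body of A: item_utilities[item].append(profit) with default []
def aStep (d : PySem.Dict Int (List Int)) (q : Int × Int) : PySem.Dict Int (List Int) :=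
  d.modify q.1 [] (fun v => v ++ [q.2])

def categorize_items (dataset : List (List (String × List Int))) : List Int × List Int × List Int :=
  let item_utilities : PySem.Dict Int (List Int) :=
    dataset.foldl (fun d t => ((tGet t "items").zip (tGet t "profit")).foldl aStep d)
      PySem.Dict.empty
  item_utilities.items.foldl
    (fun (acc : List Int × List Int × List Int) kv =>
      if kv.2.all (fun u => decide (0 < u)) then (acc.1 ++ [kv.1], acc.2.1, acc.2.2)
      else if kv.2.all (fun u => decide (u < 0)) then (acc.1, acc.2.1, acc.2.2 ++ [kv.1])
      else (acc.1, acc.2.1 ++ [kv.1], acc.2.2))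
    ([], [], [])

-- ===== PORT B =====

def categorize_items_alt (dataset : List (List (String × List Int))) : List Int × List Int × List Int :=
  let pairs := dataset.flatMap (fun t => (tGet t "items").zip (tGet t "profit"))
  let order := PySem.List.dedup (pairs.map (fun q => q.1))
  let has_nonpos : PySem.Set Int :=
    PySem.Set.ofList ((pairs.filter (fun q => decide (q.2 ≤ 0))).map (fun q => q.1))
  let has_nonneg : PySem.Set Int :=
    PySem.Set.ofList ((pairs.filter (fun q => decide (0 ≤ q.2))).map (fun q => q.1))
  (order.filter (fun i => !(PySem.Set.contains has_nonpos i)),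
   order.filter (fun i => PySem.Set.contains has_nonpos i && PySem.Set.contains has_nonneg i),
   order.filter (fun i => !(PySem.Set.contains has_nonneg i)))

-- ===== PRECONDITION & SPEC =====
-- Pre_ excludes exactly the inputs where Python A raises KeyError: a transaction dict
-- missing the "items" or "profit" key (B raises there too).
def Pre_categorize_items (dataset : List (List (String × List Int))) : Prop :=
  (dataset.all (fun t => (PySem.Dict.mk t).contains "items" && (PySem.Dict.mk t).contains "profit")) = true

instance (dataset : List (List (String × List Int))) : Decidable (Pre_categorize_items dataset) := by
  unfold Pre_categorize_items; infer_instance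

def pvWitness_categorize_items : (List (List (String × List Int))) :=
  [[("items", [1, 2, 3]), ("profit", [4, -1, 2])], [("items", [2, 5]), ("profit", [3, -7])]]

def Spec_categorize_items (dataset : List (List (String × List Int))) (out : List Int × List Int × List Int) : Prop := out = categorize_items_alt dataset
instance (dataset : List (List (String × List Int))) (out : List Int × List Int × List Int) : Decidable (Spec_categorize_items dataset out) := by unfold Spec_categorize_items; infer_instance

-- ===== CLAIM (what is proved, stated in full; the proofs are below) =====
def Claim_equal_categorize_items : Prop := ∀ (dataset : List (List (String × List Int))), Dom_categorize_items dataset → Pre_categorize_items dataset → Spec_categorize_items dataset (categorize_items dataset)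

-- ===== LEMMAS AND PROOFS =====

-- the nested per-transaction loop is a single fold over the flattened (item, profit) pairs
theorem foldl_inner_flatMap {α β σ : Type} (h : α → List β) (step : σ → β → σ)
    (l : List α) (init : σ) :
    l.foldl (fun s t => (h t).foldl step s) init = (l.flatMap h).foldl step init := by
  induction l generalizing init with
  | nil => rfl
  | cons a l ih => simp [List.flatMap_cons, List.foldl_append, ih]

-- A's classification loop, three append-branches, IS three filters
theorem foldl_triple_filter {α : Type} (p q : α → Bool) (ks : List α) (a b c : List α) :
    ks.foldl (fun acc k =>
        if p k then (acc.1 ++ [k], acc.2.1, acc.2.2)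
        else if q k then (acc.1, acc.2.1, acc.2.2 ++ [k])
        else (acc.1, acc.2.1 ++ [k], acc.2.2)) (a, b, c)
      = (a ++ ks.filter p,
         b ++ ks.filter (fun k => !p k && !q k),
         c ++ ks.filter (fun k => !p k && q k)) := by
  induction ks generalizing a b c with
  | nil => simp
  | cons k ks ih => by_cases hp : p k <;> by_cases hq : q k <;> simp [hp, hq, ih]

-- membership in a sign-flag set, in terms of the per-item profit list
theorem mem_flag_set (l : List (Int × Int)) (s : Int → Bool) (k : Int) :
    (k ∈ PySem.Set.ofList ((l.filter (fun q => s q.2)).map (fun q => q.1)))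
      ↔ ∃ p ∈ (l.filter (fun q => q.1 == k)).map (fun q => q.2), s p := by
  rw [PySem.Set.mem_ofList]
  simp only [List.mem_map, List.mem_filter]
  constructor
  · rintro ⟨q, ⟨hq, hs⟩, hk⟩; exact ⟨q.2, ⟨q, ⟨hq, by simp [hk]⟩, rfl⟩, hs⟩
  · rintro ⟨p, ⟨q, ⟨hq, hk⟩, hp⟩, hs⟩
    exact ⟨q, ⟨hq, hp ▸ hs⟩, by simpa using hk⟩

-- ===== VERDICT (by name: the statement is the Claim_ definition above) =====
theorem categorize_items_spec : Claim_equal_categorize_items := by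
  intro dataset _ _
  unfold Spec_categorize_items categorize_items categorize_items_alt
  simp only []
  rw [foldl_inner_flatMap]
  set l := dataset.flatMap (fun t => (tGet t "items").zip (tGet t "profit")) with hl
  have hnda : (l.foldl aStep PySem.Dict.empty).keys.Nodup := by
    have := PySem.Dict.nodup_keys_foldl_modify_key l (fun q => q.1) [] (fun _ q v => v ++ [q.2]) PySem.Dict.empty (by simp)
    simpa [aStep] using this
  have hka : (l.foldl aStep PySem.Dict.empty).keys = PySem.Set.ofList (l.map (fun q => q.1)) := by
    have := PySem.Dict.keys_foldl_modify_key l (fun q => q.1) [] (fun _ q v => v ++ [q.2]) PySem.Dict.empty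
    simpa [aStep, PySem.Set.update_nil_left] using this
  rw [PySem.Dict.items_eq_map_keys _ hnda [], List.foldl_map, hka,
      PySem.List.dedup_eq_ofList, foldl_triple_filter]
  have key : ∀ k ∈ PySem.Set.ofList (l.map (fun q => q.1)),
      (((l.foldl aStep PySem.Dict.empty).getD k []).all (fun u => decide (0 < u))
          = !(PySem.Set.contains (PySem.Set.ofList ((l.filter (fun q => decide (q.2 ≤ 0))).map (fun q => q.1))) k))
      ∧ (((l.foldl aStep PySem.Dict.empty).getD k []).all (fun u => decide (u < 0))
          = !(PySem.Set.contains (PySem.Set.ofList ((l.filter (fun q => decide (0 ≤ q.2))).map (fun q => q.1))) k)) := by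
    intro k hk
    have hps : (l.foldl aStep PySem.Dict.empty).getD k []
        = (l.filter (fun q => q.1 == k)).map (fun q => q.2) := by
      have := PySem.Dict.getD_foldl_modify_append l PySem.Dict.empty k
      simpa [aStep] using this
    set ps := (l.filter (fun q => q.1 == k)).map (fun q => q.2) with hpsdef
    have h1 : (k ∈ PySem.Set.ofList ((l.filter (fun q => decide (q.2 ≤ 0))).map (fun q => q.1)))
        ↔ ∃ p ∈ ps, decide (p ≤ 0) := mem_flag_set l (fun p => decide (p ≤ 0)) k
    have h2 : (k ∈ PySem.Set.ofList ((l.filter (fun q => decide (0 ≤ q.2))).map (fun q => q.1)))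
        ↔ ∃ p ∈ ps, decide (0 ≤ p) := mem_flag_set l (fun p => decide (0 ≤ p)) k
    rw [hps]
    have hA := PySem.Set.contains_iff (PySem.Set.ofList ((l.filter (fun q => decide (q.2 ≤ 0))).map (fun q => q.1))) k
    have hB := PySem.Set.contains_iff (PySem.Set.ofList ((l.filter (fun q => decide (0 ≤ q.2))).map (fun q => q.1))) k
    rw [h1] at hA
    rw [h2] at hB
    simp only [decide_eq_true_eq] at hA hB
    constructor
    · rw [Bool.eq_iff_iff, Bool.not_eq_true', Bool.eq_false_iff, Ne, hA]
      simp only [List.all_eq_true, decide_eq_true_eq]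
      push Not
      exact Iff.rfl
    · rw [Bool.eq_iff_iff, Bool.not_eq_true', Bool.eq_false_iff, Ne, hB]
      simp only [List.all_eq_true, decide_eq_true_eq]
      push Not
      exact Iff.rfl
  refine Prod.ext ?_ (Prod.ext ?_ ?_)
  · simp only [List.nil_append]
    exact List.filter_congr (fun k hk => (key k hk).1)
  · simp only [List.nil_append]
    refine List.filter_congr (fun k hk => ?_)
    rw [(key k hk).1, (key k hk).2]
    cases PySem.Set.contains (PySem.Set.ofList ((l.filter (fun q => decide (q.2 ≤ 0))).map (fun q => q.1))) k <;>
      cases PySem.Set.contains (PySem.Set.ofList ((l.filter (fun q => decide (0 ≤ q.2))).map (fun q => q.1))) k <;> rfl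
  · simp only [List.nil_append]
    refine List.filter_congr (fun k hk => ?_)
    rw [(key k hk).1, (key k hk).2]
    -- k has at least one profit, so it cannot be outside BOTH flag sets
    have hkmem : k ∈ l.map (fun q => q.1) := (PySem.Set.mem_ofList _ k).mp hk
    obtain ⟨q, hq, hq1⟩ := List.mem_map.mp hkmem
    have hin : k ∈ PySem.Set.ofList ((l.filter (fun q => decide (q.2 ≤ 0))).map (fun q => q.1))
        ∨ k ∈ PySem.Set.ofList ((l.filter (fun q => decide (0 ≤ q.2))).map (fun q => q.1)) := by
      have hmemps : q.2 ∈ (l.filter (fun q' => q'.1 == k)).map (fun q => q.2) :=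
        List.mem_map.mpr ⟨q, List.mem_filter.mpr ⟨hq, by simp [hq1]⟩, rfl⟩
      by_cases hle : q.2 ≤ 0
      · exact Or.inl ((mem_flag_set l (fun p => decide (p ≤ 0)) k).mpr ⟨q.2, hmemps, by simpa using hle⟩)
      · exact Or.inr ((mem_flag_set l (fun p => decide (0 ≤ p)) k).mpr ⟨q.2, hmemps, by simp at hle ⊢; omega⟩)
    cases h1 : PySem.Set.contains (PySem.Set.ofList ((l.filter (fun q => decide (q.2 ≤ 0))).map (fun q => q.1))) k with
    | true => simp
    | false =>
      cases h2 : PySem.Set.contains (PySem.Set.ofList ((l.filter (fun q => decide (0 ≤ q.2))).map (fun q => q.1))) k with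
      | true => simp
      | false =>
        exfalso
        rcases hin with h | h
        · have hc : PySem.Set.contains (PySem.Set.ofList ((l.filter (fun q => decide (q.2 ≤ 0))).map (fun q => q.1))) k = true := by
            rw [PySem.Set.contains_iff]; exact h
          rw [h1] at hc; exact Bool.false_ne_true hc
        · have hc : PySem.Set.contains (PySem.Set.ofList ((l.filter (fun q => decide (0 ≤ q.2))).map (fun q => q.1))) k = true := by
            rw [PySem.Set.contains_iff]; exact h
          rw [h2] at hc; exact Bool.false_ne_true hc
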